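-- pv_equiv track=rewrite | github.com/shivaAcharya/LeetCode | 0944-delete-columns-to-make-sorted/0944-delete-columns-to-make-sorted.py | minDeletionSize
-- ===== SOURCE A (Python) =====
-- from typing import List
--
-- def minDeletionSize(strs: List[str]) -> int:
--
--     columns = 0
--     for i in range(len(strs[0])):
--         last_char = ""
--         for j in range(len(strs)):
--             char = strs[j][i]
--             if not last_char:
--                 last_char = char
--             elif last_char > char:
--                 columns += 1
--                 break
--             last_char = char
--
--     return columns
-- ===== SOURCE B (Python) =====
-- from typing import List
--
-- def minDeletionSize(strs: List[str]) -> int: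
--     ncols = len(strs[0])
--     cols = [[s[i] for s in strs] for i in range(ncols)]
--     return sum(col != sorted(col) for col in cols)
-- ===== Notes on version B (the rewrite author's own statement) =====
-- stated objective: simpler
-- what changed: B transposes the input into explicit column lists and counts columns that differ from their sorted form, instead of A's per-column stateful adjacent-pair scan with an early break.
-- outside the precondition, e.g. on minDeletionSize(['c', 'b', '']): A returns 1, B raises IndexError
import Mathlib
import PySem

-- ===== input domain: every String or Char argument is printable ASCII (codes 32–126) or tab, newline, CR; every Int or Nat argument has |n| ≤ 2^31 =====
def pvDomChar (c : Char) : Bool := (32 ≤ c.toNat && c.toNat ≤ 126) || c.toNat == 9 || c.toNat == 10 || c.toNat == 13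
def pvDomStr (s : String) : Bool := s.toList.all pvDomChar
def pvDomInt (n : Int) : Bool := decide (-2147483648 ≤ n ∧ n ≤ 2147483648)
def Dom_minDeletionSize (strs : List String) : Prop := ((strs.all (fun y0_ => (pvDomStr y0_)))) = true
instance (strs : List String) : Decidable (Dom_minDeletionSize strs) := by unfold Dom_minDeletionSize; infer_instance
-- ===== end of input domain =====

-- ===== PORT A =====
-- B replaces A's stateful adjacent-pair column scan by comparing each transposed column with its sorted form (objective: simpler).
-- Note: on inputs excluded by Pre_ (empty list / a string shorter than strs[0]) Python raises IndexError on some or all code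
-- paths; the ports totalize those index accesses with fixed defaults ("" for strs[0]/strs[j], ' ' for s[i]), unreachable under Pre_.

-- inner loop 'for j in range(len(strs))' of A, with last_char = "" ported as none and 'break' as returning columns + 1
def pvInnerA (strs : List String) (i : Int) : List Int → Option Char → Int → Int
  | [], _, columns => columns
  | j :: js, lastChar, columns =>
    let char := (PySem.Str.pyGet? (PySem.List.pyGetD strs j "") i).getD ' '
    match lastChar with
    | none => pvInnerA strs i js (some char) columns
    | some lc => if char < lc then columns + 1 else pvInnerA strs i js (some char) columns

def minDeletionSize (strs : List String) : Int :=
  (PySem.List.pyRange 0 (PySem.Str.len (strs.headD "")) 1).foldl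
    (fun columns i => pvInnerA strs i (PySem.List.pyRange 0 (strs.length : Int) 1) none columns) 0

-- ===== PORT B =====
def minDeletionSize_alt (strs : List String) : Int :=
  let ncols := PySem.Str.len (strs.headD "")
  let cols := (PySem.List.pyRange 0 ncols 1).map
    (fun i => strs.map (fun s => (PySem.Str.pyGet? s i).getD ' '))
  (cols.map (fun col => if col ≠ PySem.List.sorted col (fun x => x) false then (1 : Int) else 0)).sum

-- ===== PRECONDITION & SPEC =====
-- Pre_ excludes the empty list (strs[0] raises IndexError in both programs) and ragged inputs where some string is
-- shorter than strs[0]: there both programs normally raise IndexError, and any return by A depends on accidental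
-- early breaks hiding the short string (see the cite in the claim).
def Pre_minDeletionSize (strs : List String) : Prop :=
  strs ≠ [] ∧ ∀ s ∈ strs, (strs.headD "").toList.length ≤ s.toList.length
instance (strs : List String) : Decidable (Pre_minDeletionSize strs) := by
  unfold Pre_minDeletionSize; infer_instance
def pvWitness_minDeletionSize : List String := ["cba", "daf", "ghi"]

def Spec_minDeletionSize (strs : List String) (out : Int) : Prop := out = minDeletionSize_alt strs
instance (strs : List String) (out : Int) : Decidable (Spec_minDeletionSize strs out) := by unfold Spec_minDeletionSize; infer_instance

-- ===== CLAIM (what is proved, stated in full; the proofs are below) =====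
def Claim_equal_minDeletionSize : Prop := ∀ (strs : List String), Dom_minDeletionSize strs → Pre_minDeletionSize strs → Spec_minDeletionSize strs (minDeletionSize strs)

-- ===== LEMMAS AND PROOFS =====

-- proof-side mirror of A's inner loop, over the already-extracted column characters
def pvScan : List Char → Option Char → Int → Int
  | [], _, c => c
  | x :: xs, none, c => pvScan xs (some x) c
  | x :: xs, some l, c => if x < l then c + 1 else pvScan xs (some x) c

theorem pvInnerA_eq_scan (strs : List String) (i : Int) :
    ∀ (js : List Int) (lc : Option Char) (c : Int),
      pvInnerA strs i js lc c
        = pvScan (js.map (fun j => (PySem.Str.pyGet? (PySem.List.pyGetD strs j "") i).getD ' ')) lc c := by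
  intro js
  induction js with
  | nil => intro lc c; cases lc <;> rfl
  | cons j js ih =>
    intro lc c
    cases lc with
    | none => simp [pvInnerA, pvScan, ih]
    | some l => simp only [pvInnerA, pvScan, List.map]; split <;> simp [ih]

theorem pvScan_some (xs : List Char) : ∀ (l : Char) (c : Int),
    pvScan xs (some l) c = c + (if List.Pairwise (· ≤ ·) (l :: xs) then 0 else 1) := by
  induction xs with
  | nil => intro l c; simp [pvScan]
  | cons x xs ih =>
    intro l c
    by_cases h : x < l
    · simp [pvScan, h, List.pairwise_cons, not_le.mpr h]
    · have hle : l ≤ x := not_lt.mp h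
      have hiff : ((l ≤ x ∧ ∀ a ∈ xs, l ≤ a) ∧ (∀ a' ∈ xs, x ≤ a') ∧ List.Pairwise (· ≤ ·) xs)
          ↔ ((∀ a' ∈ xs, x ≤ a') ∧ List.Pairwise (· ≤ ·) xs) :=
        ⟨fun ⟨_, hx, hp⟩ => ⟨hx, hp⟩,
         fun ⟨hx, hp⟩ => ⟨⟨hle, fun a ha => le_trans hle (hx a ha)⟩, hx, hp⟩⟩
      simp [pvScan, h, ih, List.pairwise_cons, hiff]

theorem pvScan_none (xs : List Char) (c : Int) :
    pvScan xs none c = c + (if List.Pairwise (· ≤ ·) xs then 0 else 1) := by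
  cases xs with
  | nil => simp [pvScan]
  | cons x xs => simpa [pvScan] using pvScan_some xs x c

theorem sorted_ne_iff (col : List Char) :
    (col ≠ PySem.List.sorted col (fun x => x) false) ↔ ¬ List.Pairwise (· ≤ ·) col := by
  rw [not_iff_not]
  constructor
  · intro h
    have hp := PySem.List.sorted_pairwise col (fun x => x) (κ := Char)
    rw [h]
    simpa using hp
  · intro hp
    exact (PySem.List.sorted_eq_self_of_pairwise col (fun x => x) (by simpa using hp)).symm

theorem pvCol_eq (strs : List String) (i : Int) :
    (PySem.List.pyRange 0 (strs.length : Int) 1).map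
        (fun j => (PySem.Str.pyGet? (PySem.List.pyGetD strs j "") i).getD ' ')
      = strs.map (fun s => (PySem.Str.pyGet? s i).getD ' ') := by
  rw [show (fun j => (PySem.Str.pyGet? (PySem.List.pyGetD strs j "") i).getD ' ')
        = (fun s => (PySem.Str.pyGet? s i).getD ' ') ∘ (fun j => PySem.List.pyGetD strs j "") from rfl,
      ← List.map_map, PySem.List.map_pyGetD_pyRange_zero']

theorem pvInnerA_closed (strs : List String) (i : Int) (c : Int) :
    pvInnerA strs i (PySem.List.pyRange 0 (strs.length : Int) 1) none c
      = c + (if (strs.map fun s => (PySem.Str.pyGet? s i).getD ' ')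
               ≠ PySem.List.sorted (strs.map fun s => (PySem.Str.pyGet? s i).getD ' ') (fun x => x) false
             then 1 else 0) := by
  rw [pvInnerA_eq_scan, pvCol_eq, pvScan_none]
  by_cases h : List.Pairwise (· ≤ ·) (strs.map fun s => (PySem.Str.pyGet? s i).getD ' ')
  · rw [if_pos h, if_neg (by rw [not_not]; exact not_not.mp ((not_iff_not.mpr (sorted_ne_iff _)).mpr (not_not.mpr h)))]
  · rw [if_neg h, if_pos ((sorted_ne_iff _).mpr h)]

theorem pvFoldl_closed (strs : List String) :
    ∀ (I : List Int) (c : Int),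
      I.foldl (fun columns i =>
          pvInnerA strs i (PySem.List.pyRange 0 (strs.length : Int) 1) none columns) c
        = c + (I.map (fun i =>
            if (strs.map fun s => (PySem.Str.pyGet? s i).getD ' ')
               ≠ PySem.List.sorted (strs.map fun s => (PySem.Str.pyGet? s i).getD ' ') (fun x => x) false
            then (1 : Int) else 0)).sum := by
  intro I
  induction I with
  | nil => intro c; simp
  | cons i I ih =>
    intro c
    rw [List.foldl_cons, pvInnerA_closed, ih, List.map_cons, List.sum_cons]
    ring

-- ===== VERDICT (by name: the statement is the Claim_ definition above) =====
theorem minDeletionSize_spec : Claim_equal_minDeletionSize := by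
  intro strs _ _
  unfold Spec_minDeletionSize minDeletionSize minDeletionSize_alt
  rw [pvFoldl_closed]
  simp only [List.map_map, Function.comp_def, zero_add]
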